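-- pv_equiv track=rewrite | github.com/Eden-Alem/Competitive-Programming | Week 4/SushiForTwo.py | solve
-- ===== SOURCE A (Python) =====
-- def solve(sushi):
--     result = []
--     point = 0
--     s = 0
--     while s < len(sushi)-1:
--         if sushi[s] == sushi[s+1]:
--             point += 1
--         else:
--             result.append((sushi[s], point + 1))
--             point = 0
--         s += 1
--     result.append((sushi[s], point + 1))
--
--
--     response = 0
--     for a in range(len(result) - 1):
--         val = min(result[a][1], result[a+1][1])
--         response = max(val, response)
--
--     return response * 2
-- ===== SOURCE B (Python) =====
-- def solve(sushi):
--     last = sushi[0]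
--     prev_run = 0
--     cur_run = 1
--     ans = 0
--     for x in sushi[1:]:
--         if x == last:
--             cur_run += 1
--         else:
--             ans = max(ans, min(prev_run, cur_run))
--             prev_run = cur_run
--             cur_run = 1
--             last = x
--     ans = max(ans, min(prev_run, cur_run))
--     return ans * 2
-- ===== Notes on version B (the rewrite author's own statement) =====
-- stated objective: faster
-- what changed: Replaces A's two-phase algorithm (build an explicit run-length list of (value,count) tuples, then scan its adjacent pairs) with a single streaming pass keeping only three scalars (previous run length, current run length, best answer).
import Mathlib
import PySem

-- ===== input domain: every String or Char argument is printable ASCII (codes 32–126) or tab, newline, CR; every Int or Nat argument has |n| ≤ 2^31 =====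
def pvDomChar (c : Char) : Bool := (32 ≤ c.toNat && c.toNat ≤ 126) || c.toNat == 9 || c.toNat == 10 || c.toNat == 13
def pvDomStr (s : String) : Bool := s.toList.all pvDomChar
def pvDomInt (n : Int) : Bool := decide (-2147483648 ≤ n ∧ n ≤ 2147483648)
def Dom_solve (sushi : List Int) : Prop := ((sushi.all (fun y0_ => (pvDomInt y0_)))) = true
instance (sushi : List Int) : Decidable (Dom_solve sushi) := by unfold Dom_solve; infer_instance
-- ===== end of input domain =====

-- B replaces A's two-phase algorithm (explicit run-length list, then adjacent-pair scan)
-- by a single streaming pass keeping three scalars; same O(n) time, O(1) extra space.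


-- ===== PORT A =====
-- A's while loop compares sushi[s] with sushi[s+1]; transliterated as the obvious
-- structural recursion on the list with the same state (point, result).
def buildRuns (point : Int) (result : List (Int × Int)) : List Int → List (Int × Int)
  | [] => result
  | [x] => result ++ [(x, point + 1)]
  | x :: y :: rest =>
    if x = y then buildRuns (point + 1) result (y :: rest)
    else buildRuns 0 (result ++ [(x, point + 1)]) (y :: rest)

-- A's second for loop over adjacent indices of result, same accumulator `response`.
def maxAdj (response : Int) : List (Int × Int) → Int
  | r1 :: r2 :: rest => maxAdj (max (min r1.2 r2.2) response) (r2 :: rest)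
  | _ => response

def solve (sushi : List Int) : Int := (maxAdj 0 (buildRuns 0 [] sushi)) * 2

-- ===== PORT B =====
def loopB (last prevRun curRun ans : Int) : List Int → Int
  | [] => max ans (min prevRun curRun)
  | x :: rest =>
    if x = last then loopB last prevRun (curRun + 1) ans rest
    else loopB x curRun 1 (max ans (min prevRun curRun)) rest

def solve_alt (sushi : List Int) : Int :=
  match sushi with
  | [] => 0
  | x :: rest => (loopB x 0 1 0 rest) * 2

-- ===== PRECONDITION & SPEC =====
-- Pre_ excludes the empty list, on which both Pythons raise IndexError (sushi[0]).
def Pre_solve (sushi : List Int) : Prop := sushi ≠ []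
instance (sushi : List Int) : Decidable (Pre_solve sushi) := by unfold Pre_solve; infer_instance
def pvWitness_solve : List Int := ([2, 2, 1])
def Spec_solve (sushi : List Int) (out : Int) : Prop := out = solve_alt sushi
instance (sushi : List Int) (out : Int) : Decidable (Spec_solve sushi out) := by unfold Spec_solve; infer_instance

-- ===== CLAIM (what is proved, stated in full; the proofs are below) =====
def Claim_equal_solve : Prop := ∀ (sushi : List Int), Dom_solve sushi → Pre_solve sushi → Spec_solve sushi (solve sushi)

-- ===== LEMMAS AND PROOFS =====

-- buildRuns only appends to its accumulator.
theorem buildRuns_acc (l : List Int) : ∀ (p : Int) (res : List (Int × Int)),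
    buildRuns p res l = res ++ buildRuns p [] l := by
  induction l with
  | nil => intro p res; simp [buildRuns]
  | cons x t ih =>
    intro p res
    cases t with
    | nil => simp [buildRuns]
    | cons y rest =>
      by_cases h : x = y
      · simp only [buildRuns, if_pos h]
        exact ih _ _
      · simp only [buildRuns, if_neg h]
        rw [ih, ih 0 ([] ++ [(x, p + 1)])]
        simp

-- Main invariant: B's streaming state corresponds to prepending a phantom run of
-- length prevRun in front of the runs A still has to produce.
theorem loopB_maxAdj (l : List Int) : ∀ (x p prevRun ans v : Int),
    loopB x prevRun (p + 1) ans l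
      = maxAdj ans ((v, prevRun) :: buildRuns p [] (x :: l)) := by
  induction l with
  | nil =>
    intro x p prevRun ans v
    simp [loopB, buildRuns, maxAdj, max_comm]
  | cons y rest ih =>
    intro x p prevRun ans v
    by_cases h : y = x
    · subst h
      simp only [loopB, buildRuns]
      have := ih y (p + 1) prevRun ans v
      rw [show p + 1 + 1 = (p + 1) + 1 by ring] at *
      exact this
    · have h' : ¬ x = y := fun e => h e.symm
      simp only [loopB, if_neg h, buildRuns, if_neg h']
      rw [buildRuns_acc (y :: rest) 0 ([] ++ [(x, p + 1)])]
      simp only [List.cons_append, List.nil_append, maxAdj]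
      have hb := ih y 0 (p + 1) (max ans (min prevRun (p + 1))) x
      simp only [zero_add] at hb
      rw [hb, max_comm ans (min prevRun (p + 1))]

-- A phantom leading run of length 0 does not change the answer when ans = 0.
theorem maxAdj_zero_head (R : List (Int × Int)) (v : Int) :
    maxAdj 0 ((v, 0) :: R) = maxAdj 0 R := by
  cases R with
  | nil => simp [maxAdj]
  | cons r rest =>
    simp only [maxAdj]
    congr 1
    have : min (0 : Int) r.2 ≤ 0 := min_le_left _ _
    omega

-- ===== VERDICT (by name: the statement is the Claim_ definition above) =====
theorem solve_spec : Claim_equal_solve := by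
  intro sushi _ hpre
  cases sushi with
  | nil => exact absurd rfl hpre
  | cons x rest =>
    show solve (x :: rest) = solve_alt (x :: rest)
    simp only [solve, solve_alt]
    congr 1
    have h := loopB_maxAdj rest x 0 0 0 x
    simp only [zero_add] at h
    rw [h, maxAdj_zero_head]
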